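-- pv_equiv track=rewrite | github.com/Peritract/adventofcode | 2020/day_12.py | rotate
-- ===== SOURCE A (Python) =====
-- def rotate(w, t):
--     turn = 0
--     while turn < t[1]:
--         if t[0] != 'R':
--             w = [w[1], -w[0]]
--         else:
--             w = [-w[1], w[0]]
--         turn += 90
--     return w
-- ===== SOURCE B (Python) =====
-- def rotate(w, t):
--     n = -(-t[1] // 90)          # number of 90-degree steps = ceil(t[1]/90)
--     if n <= 0:
--         return w
--     k = n % 4
--     if t[0] == 'R':
--         k = (-k) % 4
--     x, y = w[0], w[1]
--     return [[x, y], [y, -x], [-x, -y], [-y, x]][k]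
-- ===== Notes on version B (the rewrite author's own statement) =====
-- stated objective: alternative
-- what changed: B replaces A's one-90-degree-step-at-a-time while loop by a closed form: it computes ceil(t[1]/90) mod 4 and looks the rotated vector up in a 4-entry table (O(1) steps vs O(t[1]) loop iterations; a timing run did not consistently confirm a speed-up on the generated inputs).
import Mathlib
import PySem

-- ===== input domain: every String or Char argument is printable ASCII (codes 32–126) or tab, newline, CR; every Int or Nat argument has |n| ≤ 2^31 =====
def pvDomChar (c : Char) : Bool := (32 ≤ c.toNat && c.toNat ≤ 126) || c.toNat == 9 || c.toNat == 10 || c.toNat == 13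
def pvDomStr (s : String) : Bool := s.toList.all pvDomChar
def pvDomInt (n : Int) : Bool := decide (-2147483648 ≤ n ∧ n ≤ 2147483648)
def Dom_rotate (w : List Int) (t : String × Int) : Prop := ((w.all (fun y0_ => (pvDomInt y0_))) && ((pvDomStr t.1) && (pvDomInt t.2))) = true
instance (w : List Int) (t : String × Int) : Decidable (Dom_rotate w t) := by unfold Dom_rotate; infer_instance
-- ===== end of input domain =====

-- B computes ceil(t.2/90) mod 4 quarter-turns in closed form (table lookup) instead of A's
-- one-step-per-90-degrees loop; objective: alternative (closed form instead of iteration).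

-- ===== PORT A =====
-- the while loop of A; turn is the loop counter, w the current waypoint list.
-- On an index error (list shorter than 2) Python raises; the port returns [] there,
-- and Pre_rotate excludes exactly those inputs.
def rotateLoop (t : String × Int) (w : List Int) (turn : Int) : List Int :=
  if _h : turn < t.2 then
    match PySem.List.pyGet? w 1, PySem.List.pyGet? w 0 with
    | some b, some a =>
        rotateLoop t (if t.1 ≠ "R" then [b, -a] else [-b, a]) (turn + 90)
    | _, _ => []
  else w
termination_by (t.2 - turn).toNat
decreasing_by omega

def rotate (w : List Int) (t : String × Int) : List Int :=
  rotateLoop t w 0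

-- ===== PORT B =====
def rotate_alt (w : List Int) (t : String × Int) : List Int :=
  let n := -(PySem.Int.floordiv (-t.2) 90)
  if n ≤ 0 then w
  else
    let k := PySem.Int.mod n 4
    let k := if t.1 = "R" then PySem.Int.mod (-k) 4 else k
    match PySem.List.pyGet? w 0, PySem.List.pyGet? w 1 with
    | some x, some y =>
        (PySem.List.pyGet? [[x, y], [y, -x], [-x, -y], [-y, x]] k).getD []
    | _, _ => []

-- ===== PRECONDITION & SPEC =====
-- Pre_ excludes exactly the inputs where Python A raises IndexError (positive turn amount
-- with fewer than two waypoint components); B raises the same IndexError there.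
def Pre_rotate (w : List Int) (t : String × Int) : Prop := 0 < t.2 → 2 ≤ w.length
instance (w : List Int) (t : String × Int) : Decidable (Pre_rotate w t) := by unfold Pre_rotate; infer_instance
def pvWitness_rotate : List Int × (String × Int) := ([10, 4], ("R", 180))
def Spec_rotate (w : List Int) (t : String × Int) (out : List Int) : Prop := out = rotate_alt w t
instance (w : List Int) (t : String × Int) (out : List Int) : Decidable (Spec_rotate w t out) := by unfold Spec_rotate; infer_instance

-- ===== CLAIM (what is proved, stated in full; the proofs are below) =====
def Claim_equal_rotate : Prop := ∀ (w : List Int) (t : String × Int), Dom_rotate w t → Pre_rotate w t → Spec_rotate w t (rotate w t)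

-- ===== LEMMAS AND PROOFS =====

theorem get_zero (a b : Int) (l : List Int) : PySem.List.pyGet? (a :: b :: l) 0 = some a :=
  PySem.List.pyGet?_zero_cons a (b :: l)

theorem get_one (a b : Int) (l : List Int) : PySem.List.pyGet? (a :: b :: l) 1 = some b := by
  simp

-- one quarter-turn on a pair; r = true means clockwise ('R')
def quarter (r : Bool) (p : Int × Int) : Int × Int :=
  if r then (-p.2, p.1) else (p.2, -p.1)

theorem quarter_four (r : Bool) (p : Int × Int) : (quarter r)^[4] p = p := by
  cases r <;> simp [quarter, Function.iterate_succ_apply']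

theorem quarter_iterate_mod (r : Bool) (m : Nat) (p : Int × Int) :
    (quarter r)^[m] p = (quarter r)^[m % 4] p := by
  induction m using Nat.strong_induction_on with
  | _ m ih =>
    by_cases h : m < 4
    · rw [Nat.mod_eq_of_lt h]
    · have h4 : m = (m - 4) + 4 := by omega
      rw [h4, Function.iterate_add_apply, quarter_four, ih (m - 4) (by omega)]
      congr 1
      omega

-- A's loop on a 2-element list computes iterated quarter-turns;
-- n = number of remaining iterations = ceil((t.2 - turn) / 90) (0 if nonpositive)
theorem rotateLoop_eq (t : String × Int) (n : Nat) :
    ∀ (turn x y : Int), ((t.2 - turn).toNat + 89) / 90 = n →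
      rotateLoop t [x, y] turn =
        [((quarter (t.1 == "R"))^[n] (x, y)).1, ((quarter (t.1 == "R"))^[n] (x, y)).2] := by
  induction n with
  | zero =>
    intro turn x y hn
    have : ¬ turn < t.2 := by omega
    rw [rotateLoop]
    simp [this]
  | succ n ih =>
    intro turn x y hn
    have hlt : turn < t.2 := by omega
    have hrec : ((t.2 - (turn + 90)).toNat + 89) / 90 = n := by omega
    rw [rotateLoop]
    simp only [hlt, dif_pos, get_zero, get_one]
    by_cases hR : t.1 = "R"
    · have hRb : (t.1 == "R") = true := by simp [hR]
      rw [if_neg (by simp [hR]), ih (turn + 90) (-y) x hrec,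
          Function.iterate_succ_apply]
      simp [hRb, quarter]
    · have hRb : (t.1 == "R") = false := by simp [hR]
      rw [if_pos (by simp [hR]), ih (turn + 90) y (-x) hrec,
          Function.iterate_succ_apply]
      simp [hRb, quarter]

theorem ceil_count (a : Int) (h : 0 < a) :
    -(PySem.Int.floordiv (-a) 90) = ((a.toNat + 89) / 90 : Nat) := by
  rw [PySem.Int.floordiv_eq_ediv_of_pos (by omega)]
  omega

-- ===== VERDICT (by name: the statement is the Claim_ definition above) =====
theorem rotate_spec : Claim_equal_rotate := by
  intro w t _hdom hpre
  unfold Spec_rotate rotate rotate_alt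
  by_cases hpos : 0 < t.2
  · -- at least one iteration; w has >= 2 elements
    obtain ⟨x, y, rest, rfl⟩ : ∃ x y rest, w = x :: y :: rest := by
      match w, hpre hpos with
      | x :: y :: rest, _ => exact ⟨x, y, rest, rfl⟩
    set m : Nat := (t.2.toNat + 89) / 90 with hm
    have hm1 : 1 ≤ m := by omega
    have hn : -(PySem.Int.floordiv (-t.2) 90) = (m : Int) := by
      rw [ceil_count t.2 hpos]
    have hrec : ((t.2 - 90).toNat + 89) / 90 = m - 1 := by omega
    have hms : m = (m - 1) + 1 := by omega
    -- unfold A's loop one step, then use rotateLoop_eq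
    have hstepA : rotateLoop t (x :: y :: rest) 0 =
        [((quarter (t.1 == "R"))^[m] (x, y)).1, ((quarter (t.1 == "R"))^[m] (x, y)).2] := by
      rw [rotateLoop]
      simp only [hpos, dif_pos, get_zero, get_one, zero_add]
      by_cases hR : t.1 = "R"
      · have hRb : (t.1 == "R") = true := by simp [hR]
        rw [if_neg (by simp [hR]), rotateLoop_eq t (m - 1) 90 (-y) x hrec, hms,
            Function.iterate_succ_apply]
        simp [hRb, quarter]
      · have hRb : (t.1 == "R") = false := by simp [hR]
        rw [if_pos (by simp [hR]), rotateLoop_eq t (m - 1) 90 y (-x) hrec, hms,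
            Function.iterate_succ_apply]
        simp [hRb, quarter]
    rw [hstepA]
    simp only [hn, get_zero, get_one]
    rw [if_neg (by omega)]
    rw [quarter_iterate_mod]
    have hk : PySem.Int.mod (m : Int) 4 = ((m % 4 : Nat) : Int) := by
      rw [PySem.Int.mod_eq_emod_of_pos (by omega)]; omega
    rw [hk]
    have h4 : m % 4 = 0 ∨ m % 4 = 1 ∨ m % 4 = 2 ∨ m % 4 = 3 := by omega
    by_cases hR : t.1 = "R"
    · have hRb : (t.1 == "R") = true := by simp [hR]
      rw [if_pos hR]
      rcases h4 with h | h | h | h <;>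
        simp [h, hRb, quarter, PySem.Int.mod, PySem.List.pyGet?, PySem.List.pyIdx?,
              Function.iterate_succ_apply']
    · have hRb : (t.1 == "R") = false := by simp [hR]
      rw [if_neg hR]
      rcases h4 with h | h | h | h <;>
        simp [h, hRb, quarter, PySem.List.pyGet?, PySem.List.pyIdx?,
              Function.iterate_succ_apply']
  · -- no iterations: both sides return w unchanged
    have hA : rotateLoop t w 0 = w := by rw [rotateLoop]; simp [hpos]
    have hle : -(PySem.Int.floordiv (-t.2) 90) ≤ 0 := by
      have : 0 ≤ PySem.Int.floordiv (-t.2) 90 := by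
        rw [PySem.Int.floordiv_eq_ediv_of_pos (by omega)]
        exact Int.ediv_nonneg (by omega) (by omega)
      omega
    rw [hA]
    simp only [if_pos hle]
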